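-- pv_equiv track=rewrite | github.com/seggiani-luca/appunti-ed | code/python/orbitals.py | get_noble
-- ===== SOURCE A (Python) =====
-- def get_noble(z):
--     def block(n):
--         return 2 * n ** 2
--
--     noble = 0 # z number of noble gas
--     row = 1   # distinguishes between the two rows periodic table blocks
--               # increase by
--     n = 1     # n number of noble gas
--
--     # go through each row finding the biggest noble gas
--     while noble + block(n) < z:
--         # clamp row and increase n if needed
--         if row >= 2:
--             row = 0
--             n += 1
--
--         # go thorugh the next period
--         noble += block(n)
--         row += 1
--
--     return noble, n
-- ===== SOURCE B (Python) =====
-- def get_noble(z):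
--     # Closed-form cumulative noble values + binary search on the period number
--     # instead of accumulating block by block.
--     def cum(n):
--         # cumulative atomic number after both blocks of period n
--         return 2 * n * (n + 1) * (2 * n + 1) // 3 - 2
--
--     if z <= 2:
--         return (0, 1)
--     if z <= 4:
--         return (2, 1)
--     # smallest n >= 2 with z <= cum(n) + 2*n*n  (monotone threshold)
--     lo, hi = 2, z
--     while lo < hi:
--         mid = (lo + hi) // 2
--         if z <= cum(mid) + 2 * mid * mid:
--             hi = mid
--         else:
--             lo = mid + 1
--     n = lo
--     if z <= cum(n):
--         return (cum(n - 1) + 2 * n * n, n)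
--     return (cum(n), n)
-- ===== Notes on version B (the rewrite author's own statement) =====
-- stated objective: faster
-- what changed: Replaced the block-by-block accumulation loop with the closed form for cumulative noble atomic numbers plus a binary search for the period, then a two-way branch picks the block.
import Mathlib
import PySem

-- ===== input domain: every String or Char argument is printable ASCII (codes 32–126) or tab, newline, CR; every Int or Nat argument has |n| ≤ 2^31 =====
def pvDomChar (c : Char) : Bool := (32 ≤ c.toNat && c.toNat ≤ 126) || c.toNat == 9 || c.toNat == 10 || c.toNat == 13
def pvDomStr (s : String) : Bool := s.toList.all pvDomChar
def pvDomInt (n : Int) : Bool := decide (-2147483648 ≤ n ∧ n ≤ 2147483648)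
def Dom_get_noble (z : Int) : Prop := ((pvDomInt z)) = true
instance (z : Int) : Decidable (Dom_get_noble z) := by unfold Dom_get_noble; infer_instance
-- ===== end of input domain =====

-- B replaces A's block-by-block accumulation loop by the closed form for the cumulative
-- noble atomic numbers plus a binary search for the period (objective: faster).

-- ===== PORT A =====
-- literal transliteration of A's while loop; fuel is only a totality guard
-- (amply larger than the iteration count for any admitted z)
def get_noble_loop (z noble row n : Int) (fuel : Nat) : Int × Int :=
  match fuel with
  | 0 => (noble, n)
  | fuel + 1 =>
    if noble + 2 * n ^ 2 < z then
      if 2 ≤ row then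
        get_noble_loop z (noble + 2 * (n + 1) ^ 2) (0 + 1) (n + 1) fuel
      else
        get_noble_loop z (noble + 2 * n ^ 2) (row + 1) n fuel
    else (noble, n)

def get_noble (z : Int) : Int × Int := get_noble_loop z 0 1 1 (2 * z.toNat + 2)

-- ===== PORT B =====
-- cum n = 2*n*(n+1)*(2*n+1)//3 - 2, the cumulative value after both blocks of period n
def cumN (n : Int) : Int := PySem.Int.floordiv (2 * n * (n + 1) * (2 * n + 1)) 3 - 2

-- binary search: smallest n in [lo,hi] with z <= cum n + 2*n*n
def get_noble_search (z lo hi : Int) : Int :=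
  if h : lo < hi then
    let mid := PySem.Int.floordiv (lo + hi) 2
    if z ≤ cumN mid + 2 * mid * mid then get_noble_search z lo mid
    else get_noble_search z (mid + 1) hi
  else lo
termination_by (hi - lo).toNat
decreasing_by
  · have : PySem.Int.floordiv (lo + hi) 2 < hi := by
      rw [PySem.Int.floordiv_lt_iff_lt_mul (by omega)]; omega
    omega
  · have hb := PySem.Int.floordiv_two_mid_bounds (le_of_lt h)
    omega

def get_noble_alt (z : Int) : Int × Int :=
  if z ≤ 2 then (0, 1)
  else if z ≤ 4 then (2, 1)
  else
    let n := get_noble_search z 2 z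
    if z ≤ cumN n then (cumN (n - 1) + 2 * n * n, n) else (cumN n, n)

-- ===== PRECONDITION & SPEC =====
def Spec_get_noble (z : Int) (out : Int × Int) : Prop := out = get_noble_alt z
instance (z : Int) (out : Int × Int) : Decidable (Spec_get_noble z out) := by unfold Spec_get_noble; infer_instance

-- ===== CLAIM (what is proved, stated in full; the proofs are below) =====
def Claim_equal_get_noble : Prop := ∀ (z : Int), Dom_get_noble z → Spec_get_noble z (get_noble z)

-- ===== LEMMAS AND PROOFS =====

-- the common answer shape: the result for the period containing z
def ansN (z n : Int) : Int × Int :=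
  if z ≤ cumN n then (cumN (n - 1) + 2 * n * n, n) else (cumN n, n)

-- a result is "good" if it is ansN at the unique period whose thresholds bracket z
def GoodN (z : Int) (r : Int × Int) : Prop :=
  ∃ n : Int, 1 ≤ n ∧ (1 < n → cumN (n - 1) + 2 * (n - 1) * (n - 1) < z) ∧
    z ≤ cumN n + 2 * n * n ∧ r = ansN z n

theorem cum_key (n : Int) : 3 * (cumN n + 2) = 2 * n * (n + 1) * (2 * n + 1) := by
  have hdvd : (3 : Int) ∣ 2 * n * (n + 1) * (2 * n + 1) := by
    have hr : n % 3 = 0 ∨ n % 3 = 1 ∨ n % 3 = 2 := by omega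
    rcases hr with h | h | h
    · obtain ⟨k, rfl⟩ : ∃ k : Int, n = 3 * k := ⟨n / 3, by omega⟩
      exact ⟨2 * k * (3 * k + 1) * (6 * k + 1), by ring⟩
    · obtain ⟨k, rfl⟩ : ∃ k : Int, n = 3 * k + 1 := ⟨n / 3, by omega⟩
      exact ⟨2 * (3 * k + 1) * (3 * k + 2) * (2 * k + 1), by ring⟩
    · obtain ⟨k, rfl⟩ : ∃ k : Int, n = 3 * k + 2 := ⟨n / 3, by omega⟩
      exact ⟨2 * (3 * k + 2) * (k + 1) * (6 * k + 5), by ring⟩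
  unfold cumN
  rw [PySem.Int.floordiv_eq_ediv_of_pos (by norm_num)]
  have := Int.ediv_mul_cancel hdvd
  omega

-- cumulative step: cum n = cum (n-1) + 4*n^2
-- cumulative step: cum n = cum (n-1) + 4*n^2
theorem cum_succ (n : Int) : cumN n = cumN (n - 1) + 4 * n * n := by
  have h1 := cum_key n
  have h2 := cum_key (n - 1)
  have h3 : 3 * (cumN n + 2) = 3 * ((cumN (n - 1) + 2) + 4 * n * n) := by
    linear_combination h1 - h2
  linarith

-- the threshold cum n + 2 n^2 is monotone on n ≥ 1
theorem T_mono {a b : Int} (ha : 1 ≤ a) (hab : a ≤ b) :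
    cumN a + 2 * a * a ≤ cumN b + 2 * b * b := by
  have h1 := cum_key a
  have h2 := cum_key b
  nlinarith [mul_nonneg (sub_nonneg.2 hab) (sub_nonneg.2 hab),
             mul_nonneg (mul_nonneg (sub_nonneg.2 hab) (sub_nonneg.2 hab)) (sub_nonneg.2 hab),
             mul_nonneg (sub_nonneg.2 hab) (mul_nonneg (by linarith : (0:Int) ≤ a) (by linarith : (0:Int) ≤ a))]

-- the threshold eventually dominates z
theorem T_big {m : Int} (hm : 2 ≤ m) : m + 3 ≤ cumN m + 2 * m * m := by
  have h := cum_key m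
  nlinarith [mul_nonneg (by linarith : (0:Int) ≤ m - 2) (by linarith : (0:Int) ≤ m - 2),
             mul_nonneg (mul_nonneg (by linarith : (0:Int) ≤ m - 2) (by linarith : (0:Int) ≤ m - 2)) (by linarith : (0:Int) ≤ m - 2)]

theorem cum0 : cumN 0 = -2 := by decide
theorem cum1 : cumN 1 = 2 := by decide

-- A's loop, entered at the start of period n (noble = cum(n-1)+2n², row = 1), exits with ansN z n
theorem loopA_exit (z n : Int) (f : Nat)
    (hz : z ≤ cumN n + 2 * n * n) :
    get_noble_loop z (cumN (n - 1) + 2 * n * n) 1 n (f + 2) = ansN z n := by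
  have hstep := cum_succ n
  have hpow : (2 : Int) * n ^ 2 = 2 * n * n := by ring
  by_cases hc : z ≤ cumN n
  · have hcond : ¬ (cumN (n - 1) + 2 * n * n + 2 * n ^ 2 < z) := by rw [hpow]; linarith
    simp [get_noble_loop, hcond, ansN, hc]
  · push_neg at hc
    have h1 : cumN (n - 1) + 2 * n * n + 2 * n ^ 2 < z := by rw [hpow]; linarith
    have h2 : ¬ (cumN (n - 1) + 2 * n * n + 2 * n ^ 2 + 2 * n ^ 2 < z) := by rw [hpow]; linarith
    simp [get_noble_loop, h1, h2, ansN, not_le.2 hc]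
    rw [hpow]; linarith

-- A's loop steps over a full period when z is beyond its threshold
theorem loopA_step (z n : Int) (f : Nat)
    (hz : cumN n + 2 * n * n < z) :
    get_noble_loop z (cumN (n - 1) + 2 * n * n) 1 n (f + 2) =
      get_noble_loop z (cumN n + 2 * (n + 1) * (n + 1)) 1 (n + 1) f := by
  have hstep := cum_succ n
  have hpow : (2 : Int) * n ^ 2 = 2 * n * n := by ring
  have h1 : cumN (n - 1) + 2 * n * n + 2 * n ^ 2 < z := by
    rw [hpow]; nlinarith [mul_self_nonneg n]
  have h2 : cumN (n - 1) + 2 * n * n + 2 * n ^ 2 + 2 * n ^ 2 < z := by rw [hpow]; linarith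
  have e1 : cumN (n - 1) + 2 * n * n + 2 * n ^ 2 + 2 * (n + 1) ^ 2 =
      cumN n + 2 * (n + 1) * (n + 1) := by linear_combination - hstep
  simp [get_noble_loop, h1, h2, e1]

-- main invariant for A's loop, by induction on how many periods remain
theorem loopA_main (z : Int) : ∀ (k : Nat) (n : Int) (fuel : Nat), 1 ≤ n →
    (1 < n → cumN (n - 1) + 2 * (n - 1) * (n - 1) < z) →
    z ≤ cumN (n + (k : Int)) + 2 * (n + (k : Int)) * (n + (k : Int)) →
    2 * k + 2 ≤ fuel →
    GoodN z (get_noble_loop z (cumN (n - 1) + 2 * n * n) 1 n fuel) := by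
  intro k
  induction k with
  | zero =>
    intro n fuel hn hlow hup hf
    obtain ⟨f, rfl⟩ : ∃ f, fuel = f + 2 := ⟨fuel - 2, by omega⟩
    simp only [Nat.cast_zero, add_zero] at hup
    rw [loopA_exit z n f hup]
    exact ⟨n, hn, hlow, hup, rfl⟩
  | succ k ih =>
    intro n fuel hn hlow hup hf
    obtain ⟨f, rfl⟩ : ∃ f, fuel = f + 2 := ⟨fuel - 2, by omega⟩
    by_cases hc : z ≤ cumN n + 2 * n * n
    · rw [loopA_exit z n f hc]
      exact ⟨n, hn, hlow, hc, rfl⟩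
    · push_neg at hc
      rw [loopA_step z n f hc]
      have hup' : z ≤ cumN ((n + 1) + (k : Int)) + 2 * ((n + 1) + (k : Int)) * ((n + 1) + (k : Int)) := by
        have e : (n + 1) + (k : Int) = n + ((k : Nat) + 1 : Nat) := by push_cast; ring
        rw [e]; exact hup
      have := ih (n + 1) f (by omega) (fun _ => by simpa using hc) hup' (by omega)
      simpa using this
  
-- A's result is good
theorem A_good (z : Int) : GoodN z (get_noble z) := by
  have e0 : (0 : Int) = cumN (1 - 1) + 2 * 1 * 1 := by rw [show (1:Int) - 1 = 0 by ring, cum0]; ring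
  unfold get_noble
  rw [e0]
  by_cases h4 : z ≤ 4
  · have := loopA_main z 0 1 (2 * z.toNat + 2) (by norm_num) (by omega)
      (by simpa [cum1] using h4) (by omega)
    simpa using this
  · push_neg at h4
    have hk : z ≤ cumN (1 + ((z - 4).toNat : Int)) + 2 * (1 + ((z - 4).toNat : Int)) * (1 + ((z - 4).toNat : Int)) := by
      have e : (1 : Int) + ((z - 4).toNat : Int) = z - 3 := by omega
      rw [e]
      have := T_big (m := z - 3) (by omega)
      linarith
    have := loopA_main z (z - 4).toNat 1 (2 * z.toNat + 2) (by norm_num) (by omega) hk (by omega)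
    simpa using this

-- binary search invariant
theorem search_main (z : Int) : ∀ (k : Nat) (lo hi : Int), (hi - lo).toNat ≤ k →
    2 ≤ lo → lo ≤ hi →
    (2 < lo → cumN (lo - 1) + 2 * (lo - 1) * (lo - 1) < z) →
    z ≤ cumN hi + 2 * hi * hi →
    2 ≤ get_noble_search z lo hi ∧
    (2 < get_noble_search z lo hi →
      cumN (get_noble_search z lo hi - 1) + 2 * (get_noble_search z lo hi - 1) * (get_noble_search z lo hi - 1) < z) ∧
    z ≤ cumN (get_noble_search z lo hi) + 2 * (get_noble_search z lo hi) * (get_noble_search z lo hi) := by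
  intro k
  induction k with
  | zero =>
    intro lo hi hk hlo hlh hlow hup
    have he : lo = hi := by omega
    subst he
    rw [get_noble_search, dif_neg (lt_irrefl lo)]
    exact ⟨hlo, hlow, hup⟩
  | succ k ih =>
    intro lo hi hk hlo hlh hlow hup
    by_cases h : lo < hi
    · have hb := PySem.Int.floordiv_two_mid_bounds (le_of_lt h)
      have hmidlt : PySem.Int.floordiv (lo + hi) 2 < hi := by
        rw [PySem.Int.floordiv_lt_iff_lt_mul (by omega)]; omega
      rw [get_noble_search, dif_pos h]
      set mid := PySem.Int.floordiv (lo + hi) 2 with hmid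
      by_cases hc : z ≤ cumN mid + 2 * mid * mid
      · simp only [hc, if_pos]
        exact ih lo mid (by omega) hlo (by omega) hlow hc
      · simp only [hc, ite_false]
        push_neg at hc
        exact ih (mid + 1) hi (by omega) (by omega) (by omega)
          (fun _ => by simpa using hc) hup
    · have he : lo = hi := by omega
      subst he
      rw [get_noble_search, dif_neg (lt_irrefl lo)]
      exact ⟨hlo, hlow, hup⟩

-- B's result is good
theorem B_good (z : Int) : GoodN z (get_noble_alt z) := by
  unfold get_noble_alt
  by_cases h2 : z ≤ 2
  · refine ⟨1, le_refl 1, by omega, by rw [cum1]; omega, ?_⟩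
    rw [if_pos h2]
    unfold ansN
    rw [if_pos (by rw [cum1]; omega), show (1:Int) - 1 = 0 by ring, cum0]
    norm_num
  · by_cases h4 : z ≤ 4
    · refine ⟨1, le_refl 1, by omega, by rw [cum1]; omega, ?_⟩
      rw [if_neg h2, if_pos h4]
      unfold ansN
      rw [if_neg (by rw [cum1]; omega), cum1]
    · push_neg at h2 h4
      have hz2 : z ≤ cumN z + 2 * z * z := by
        have := T_big (m := z) (by omega); linarith
      have hs := search_main z (z - 2).toNat 2 z (by omega) (by norm_num) (by omega)
        (by omega) hz2
      obtain ⟨hge, hlow, hup⟩ := hs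
      refine ⟨get_noble_search z 2 z, by omega, ?_, hup, ?_⟩
      · intro _
        rcases lt_or_ge 2 (get_noble_search z 2 z) with h | h
        · exact hlow h
        · have he : get_noble_search z 2 z = 2 := by omega
          rw [he]; norm_num [cum1]; linarith
      · rw [if_neg (by omega), if_neg (by omega)]
        unfold ansN
        rfl

-- the bracketing period is unique, so good results are equal
theorem Good_unique {z : Int} {r1 r2 : Int × Int} (h1 : GoodN z r1) (h2 : GoodN z r2) :
    r1 = r2 := by
  obtain ⟨a, ha1, ha2, ha3, rfl⟩ := h1
  obtain ⟨b, hb1, hb2, hb3, rfl⟩ := h2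
  have hab : a = b := by
    rcases lt_trichotomy a b with h | h | h
    · exfalso
      have hb2' := hb2 (by omega)
      have := T_mono (a := a) (b := b - 1) ha1 (by omega)
      linarith
    · exact h
    · exfalso
      have ha2' := ha2 (by omega)
      have := T_mono (a := b) (b := a - 1) hb1 (by omega)
      linarith
  rw [hab]

-- ===== VERDICT (by name: the statement is the Claim_ definition above) =====
theorem get_noble_spec : Claim_equal_get_noble := by
  intro z _
  unfold Spec_get_noble
  exact Good_unique (A_good z) (B_good z)
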